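-- pv_equiv track=rewrite | github.com/TheLatestNow/numerologyui | Python/streamlit_app.py | calculate_kua_number
-- ===== SOURCE A (Python) =====
-- def calculate_kua_number(year: int, gender: str) -> int:
--     if gender.lower() not in ["male", "female"]:
--         raise ValueError("Gender must be 'male' or 'female'")
--     while year >= 10:
--         year = sum(int(digit) for digit in str(year))
--     if gender.lower() == "male":
--         kua_number = 11 - year
--     else:  # female
--         kua_number = year + 4
--     while kua_number >= 10:
--         kua_number = sum(int(digit) for digit in str(kua_number))
--     return kua_number
-- ===== SOURCE B (Python) =====
-- def calculate_kua_number(year: int, gender: str) -> int: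
--     if gender.lower() not in ["male", "female"]:
--         raise ValueError("Gender must be 'male' or 'female'")
--     year = year if year < 10 else 1 + (year - 1) % 9
--     kua_number = (11 - year) if gender.lower() == "male" else (year + 4)
--     return kua_number if kua_number < 10 else 1 + (kua_number - 1) % 9
-- ===== Notes on version B (the rewrite author's own statement) =====
-- stated objective: idiomatic
-- what changed: Each 'while >= 10: sum digits of str()' reduction loop is replaced by the closed-form digital root 1 + (v - 1) % 9, guarded by v < 10 so single-digit, zero and negative values pass through unchanged as in A.
import Mathlib
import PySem

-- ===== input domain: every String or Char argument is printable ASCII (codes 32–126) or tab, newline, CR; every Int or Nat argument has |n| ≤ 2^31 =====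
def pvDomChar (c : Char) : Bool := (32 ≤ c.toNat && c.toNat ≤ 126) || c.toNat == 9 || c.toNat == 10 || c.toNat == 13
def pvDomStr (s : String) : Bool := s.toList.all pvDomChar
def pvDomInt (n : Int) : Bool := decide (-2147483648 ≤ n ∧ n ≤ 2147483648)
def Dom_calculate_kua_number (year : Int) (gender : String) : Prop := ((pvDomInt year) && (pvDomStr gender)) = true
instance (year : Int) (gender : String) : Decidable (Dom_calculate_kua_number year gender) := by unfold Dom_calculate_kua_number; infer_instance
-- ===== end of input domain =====

-- B replaces each `while v >= 10: v = digit sum of str(v)` loop by the closed-form digital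
-- root `1 + (v - 1) % 9` under the same `< 10` guard (idiomatic constant-time reduction).

-- ===== PORT A =====

-- `sum(int(digit) for digit in str(n))`
def pyDigitSum (n : Int) : Int :=
  ((PySem.Int.toStr n).toList.map (fun c => (PySem.Int.ofChars? [c]).getD 0)).sum

-- supporting facts needed by kuaReduce's termination proof (cited in decreasing_by)

theorem digitsSum_le (n : Nat) : (Nat.digits 10 n).sum ≤ n := by
  induction n using Nat.strong_induction_on with
  | _ n ih =>
    rcases Nat.eq_zero_or_pos n with h0 | h0
    · simp [h0]
    · rw [Nat.digits_def' (by norm_num : (1:Nat) < 10) h0]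
      have := ih (n / 10) (Nat.div_lt_self h0 (by norm_num))
      simp only [List.sum_cons]
      omega

theorem digitsSum_lt (n : Nat) (h : 10 ≤ n) : (Nat.digits 10 n).sum < n := by
  rw [Nat.digits_def' (by norm_num : (1:Nat) < 10) (by omega)]
  have := digitsSum_le (n / 10)
  simp only [List.sum_cons]
  omega

theorem digitVal_digitChar (d : Nat) (hd : d < 10) :
    (PySem.Int.ofChars? [Nat.digitChar d]).getD 0 = (d : Int) := by
  interval_cases d <;> decide

theorem toDigitsCore_sum (f : Nat) : ∀ (n : Nat) (acc : List Char), n < 10 ^ f →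
    ((Nat.toDigitsCore 10 f n acc).map (fun c => (PySem.Int.ofChars? [c]).getD 0)).sum
      = ((Nat.digits 10 n).sum : Int)
        + ((acc.map (fun c => (PySem.Int.ofChars? [c]).getD 0)).sum) := by
  induction f with
  | zero =>
    intro n acc hn
    have : n = 0 := by simpa using hn
    subst this
    simp [Nat.toDigitsCore]
  | succ f ih =>
    intro n acc hn
    rcases Nat.eq_zero_or_pos n with h0 | h0
    · subst h0
      simp [Nat.toDigitsCore, digitVal_digitChar 0 (by norm_num)]
    · rw [Nat.toDigitsCore]
      by_cases hq : n / 10 = 0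
      · have hlt : n < 10 := by omega
        rw [if_pos hq]
        rw [Nat.digits_def' (by norm_num : (1:Nat) < 10) h0, hq]
        simp [digitVal_digitChar (n % 10) (Nat.mod_lt n (by norm_num))]
      · rw [if_neg hq]
        have hq' : n / 10 < 10 ^ f := by
          rw [Nat.div_lt_iff_lt_mul (by norm_num : (0:Nat) < 10)]
          calc n < 10 ^ (f + 1) := hn
            _ = 10 ^ f * 10 := by ring
        rw [ih (n / 10) _ hq']
        rw [Nat.digits_def' (by norm_num : (1:Nat) < 10) h0]
        simp [digitVal_digitChar (n % 10) (Nat.mod_lt n (by norm_num))]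
        ring

theorem pyDigitSum_eq (n : Int) (hn : 0 ≤ n) :
    pyDigitSum n = ((Nat.digits 10 n.toNat).sum : Int) := by
  unfold pyDigitSum
  rw [PySem.Int.toList_toStr]
  unfold PySem.Int.toChars
  rw [if_neg (by omega)]
  unfold Nat.toDigits
  have hb : n.toNat < 10 ^ (n.toNat + 1) := by
    calc n.toNat < 10 ^ n.toNat := Nat.lt_pow_self (by norm_num)
      _ ≤ 10 ^ (n.toNat + 1) := Nat.pow_le_pow_right (by norm_num) (by omega)
  rw [toDigitsCore_sum (n.toNat + 1) n.toNat [] hb]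
  simp

-- the reduction loop: `while year >= 10: year = sum(int(digit) for digit in str(year))`
def kuaReduce (n : Int) : Int :=
  if h : 10 ≤ n then kuaReduce (pyDigitSum n) else n
termination_by n.toNat
decreasing_by
  rw [pyDigitSum_eq n (by omega)]
  have := digitsSum_lt n.toNat (by omega)
  omega

def calculate_kua_number (year : Int) (gender : String) : Int :=
  if ¬ (PySem.Str.lower gender ∈ (["male", "female"] : List String)) then
    0  -- A raises ValueError here; excluded by Pre_
  else
    let year1 := kuaReduce year
    let kua := if PySem.Str.lower gender = "male" then 11 - year1 else year1 + 4
    kuaReduce kua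

-- ===== PORT B =====

-- `v if v < 10 else 1 + (v - 1) % 9`
def pyDigitalRoot (n : Int) : Int :=
  if n < 10 then n else 1 + PySem.Int.mod (n - 1) 9

def calculate_kua_number_alt (year : Int) (gender : String) : Int :=
  if ¬ (PySem.Str.lower gender ∈ (["male", "female"] : List String)) then
    0  -- B raises ValueError here; excluded by Pre_
  else
    let year1 := pyDigitalRoot year
    let kua := if PySem.Str.lower gender = "male" then 11 - year1 else year1 + 4
    pyDigitalRoot kua

-- ===== PRECONDITION & SPEC =====
-- Pre_ excludes exactly the inputs where gender.lower() is neither "male" nor "female",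
-- on which A (and B) raise ValueError.
def Pre_calculate_kua_number (year : Int) (gender : String) : Prop :=
  PySem.Str.lower gender ∈ (["male", "female"] : List String)
instance (year : Int) (gender : String) : Decidable (Pre_calculate_kua_number year gender) := by
  unfold Pre_calculate_kua_number; infer_instance

def pvWitness_calculate_kua_number : Int × String := (1990, "male")

def Spec_calculate_kua_number (year : Int) (gender : String) (out : Int) : Prop := out = calculate_kua_number_alt year gender
instance (year : Int) (gender : String) (out : Int) : Decidable (Spec_calculate_kua_number year gender out) := by unfold Spec_calculate_kua_number; infer_instance

-- ===== CLAIM (what is proved, stated in full; the proofs are below) =====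
def Claim_equal_calculate_kua_number : Prop := ∀ (year : Int) (gender : String), Dom_calculate_kua_number year gender → Pre_calculate_kua_number year gender → Spec_calculate_kua_number year gender (calculate_kua_number year gender)

-- ===== LEMMAS AND PROOFS =====

theorem digitsSum_pos (n : Nat) (h : 0 < n) : 0 < (Nat.digits 10 n).sum := by
  induction n using Nat.strong_induction_on with
  | _ n ih =>
    rw [Nat.digits_def' (by norm_num : (1:Nat) < 10) h]
    simp only [List.sum_cons]
    rcases Nat.eq_zero_or_pos (n / 10) with hq | hq
    · omega
    · have := ih (n / 10) (Nat.div_lt_self h (by norm_num)) hq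
      omega


theorem kuaReduce_eq (n : Int) : kuaReduce n = pyDigitalRoot n := by
  induction n using kuaReduce.induct with
  | case1 n h ih =>
    rw [kuaReduce, dif_pos h, ih]
    have hds : pyDigitSum n = ((Nat.digits 10 n.toNat).sum : Int) :=
      pyDigitSum_eq n (by omega)
    have hmod : n.toNat % 9 = (Nat.digits 10 n.toNat).sum % 9 :=
      Nat.modEq_nine_digits_sum n.toNat
    have hlt := digitsSum_lt n.toNat (by omega)
    have hpos := digitsSum_pos n.toNat (by omega)
    unfold pyDigitalRoot
    rw [PySem.Int.mod_eq_emod_of_pos (by norm_num), PySem.Int.mod_eq_emod_of_pos (by norm_num)]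
    rw [hds]
    split_ifs <;> omega
  | case2 n h =>
    rw [kuaReduce, dif_neg h]
    unfold pyDigitalRoot
    rw [if_pos (by omega)]

theorem calculate_kua_number_eq (year : Int) (gender : String) :
    calculate_kua_number year gender = calculate_kua_number_alt year gender := by
  unfold calculate_kua_number calculate_kua_number_alt
  simp only [kuaReduce_eq]

-- ===== VERDICT (by name: the statement is the Claim_ definition above) =====
theorem calculate_kua_number_spec : Claim_equal_calculate_kua_number := by
  intro year gender _ _
  unfold Spec_calculate_kua_number
  exact calculate_kua_number_eq year gender
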